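-- pv_equiv track=rewrite | github.com/galid1/Algorithm | python/exams/21.10.30(naver-fin)/2.py | solution
-- ===== SOURCE A (Python) =====
-- def solution(n, jump):
--     answer = []
--     # 방향 정보
--     ds = [[0, 1], [1, 0], [0, -1], [-1, 0]]
--     R, D, L, U = 0, 1, 2, 3
--
--     board = [[-1 for _ in range(n)] for _ in range(n)]
--     board[0][0] = 1
--
--     dir = U
--     cur_num, end_num = 0, n*n
--     remain_jump = jump
--     hor_move, ver_move = n, n
--     cur_num = 1
--     cx, cy = 0, -1
--     while True:
--         dir = get_next(dir)
--         dx, dy = ds[dir]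
--
--         move_num = hor_move if dir == L or dir == R else ver_move
--         for _ in range(move_num):
--             cx, cy = cx+dx, cy+dy
--
--             if board[cx][cy] == -1:
--                 remain_jump -= 1
--
--             if remain_jump == 0:
--                 cur_num += 1
--                 board[cx][cy] = cur_num
--                 remain_jump = jump
--
--             if cur_num == end_num:
--                 return [cx+1, cy+1]
--
--         if dir == L or dir == R:
--             ver_move -= 1
--         else:
--             hor_move -= 1
--
--         if hor_move == 0 or ver_move == 0:
--             cx, cy = 0, -1
--             hor_move, ver_move = n, n
--             dir = U
--
--     return answer
--
-- def get_next(cur_dir):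
--     return (cur_dir+1) % 4
-- ===== SOURCE B (Python) =====
-- def _spiral(h, cx, cy):
--     # cells of the outer ring of a size-h pass, then recurse into the inner (h-2) ring
--     if h <= 0:
--         return []
--     path = []
--     for dx, dy, ln in ((0, 1, h), (1, 0, h - 1), (0, -1, h - 1), (-1, 0, h - 2)):
--         for _ in range(ln):
--             cx, cy = cx + dx, cy + dy
--             path.append((cx, cy))
--     return path + _spiral(h - 2, cx, cy)
--
--
-- def solution(n, jump):
--     path = _spiral(n, 0, -1)
--     board = [[-1] * n for _ in range(n)]
--     board[0][0] = 1
--     cur, end, remain = 1, n * n, jump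
--     while True:
--         for cx, cy in path:
--             if board[cx][cy] == -1:
--                 remain -= 1
--             if remain == 0:
--                 cur += 1
--                 board[cx][cy] = cur
--                 remain = jump
--             if cur == end:
--                 return [cx + 1, cy + 1]
-- ===== Notes on version B (the rewrite author's own statement) =====
-- stated objective: alternative
-- what changed: B replaces A's per-pass direction state machine (dir cycling, hor/ver counters, reset logic interleaved with marking) by a recursive ring-by-ring construction of the one-pass spiral path computed once, then a plain marking loop that cycles over that fixed path list.
import Mathlib
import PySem

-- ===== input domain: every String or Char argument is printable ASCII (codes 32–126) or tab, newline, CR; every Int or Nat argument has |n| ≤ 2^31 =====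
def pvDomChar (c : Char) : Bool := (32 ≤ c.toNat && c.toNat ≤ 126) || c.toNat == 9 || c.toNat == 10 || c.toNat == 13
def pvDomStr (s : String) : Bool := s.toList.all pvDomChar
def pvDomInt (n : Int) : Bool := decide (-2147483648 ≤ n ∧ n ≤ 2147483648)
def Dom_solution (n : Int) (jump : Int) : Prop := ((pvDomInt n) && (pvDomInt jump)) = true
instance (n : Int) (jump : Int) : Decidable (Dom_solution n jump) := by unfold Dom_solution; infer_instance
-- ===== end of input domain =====

-- B computes the one-pass spiral path once by recursive ring decomposition and then runs a plain
-- marking loop cycling over it, instead of A's interleaved direction/counter state machine (alternative decomposition).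

-- ===== PORT A =====

-- board[i][j] read / write as Python does them (exact whenever the indices are in range,
-- which holds for every cell the programs touch on Pre_ inputs)
def rd2 (board : List (List Int)) (i j : Int) : Int :=
  (PySem.List.pyGet? ((PySem.List.pyGet? board i).getD []) j).getD 0

def wr2 (board : List (List Int)) (i j : Int) (v : Int) : List (List Int) :=
  PySem.List.pySetD board i (PySem.List.pySetD ((PySem.List.pyGet? board i).getD []) j v)

-- ds[dir] of A's ds list
def dsGet (d : Int) : Int × Int :=
  (PySem.List.pyGet? [((0:Int),(1:Int)), (1,0), (0,-1), (-1,0)] d).getD (0, 0)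

-- the `for _ in range(move_num)` body of A (early return = .inl)
def aInner (jump endN : Int) :
    Nat → List (List Int) → Int → Int → Int → Int → Int → Int →
    (List Int) ⊕ (List (List Int) × Int × Int × Int × Int)
  | 0, board, cur, remain, cx, cy, _, _ => .inr (board, cur, remain, cx, cy)
  | k+1, board, cur, remain, cx, cy, dx, dy =>
    let cx' := cx + dx
    let cy' := cy + dy
    let remain' := if rd2 board cx' cy' == -1 then remain - 1 else remain
    let p := if remain' == 0 then (wr2 board cx' cy' (cur + 1), cur + 1, jump)
             else (board, cur, remain')
    if p.2.1 == endN then .inl [cx' + 1, cy' + 1]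
    else aInner jump endN k p.1 p.2.1 p.2.2 cx' cy' dx dy

-- A's `while True` loop; the fuel is a budget of outer (leg) iterations, large enough on every
-- Pre_ input (on which Python terminates); on fuel exhaustion the unreached `answer = []` is returned
def aLoop (n jump endN : Int) :
    Nat → List (List Int) → Int → Int → Int → Int → Int → Int → Int → List Int
  | 0, _, _, _, _, _, _, _, _ => []
  | f+1, board, dir, cur, remain, hor, ver, cx, cy =>
    let dir' := PySem.Int.mod (dir + 1) 4
    let d := dsGet dir'
    let moveNum := if dir' == 2 || dir' == 0 then hor else ver
    match aInner jump endN moveNum.toNat board cur remain cx cy d.1 d.2 with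
    | .inl ans => ans
    | .inr s =>
      let hv := if dir' == 2 || dir' == 0 then (hor, ver - 1) else (hor - 1, ver)
      if hv.1 == 0 || hv.2 == 0 then
        aLoop n jump endN f s.1 3 s.2.1 s.2.2.1 n n 0 (-1)
      else
        aLoop n jump endN f s.1 dir' s.2.1 s.2.2.1 hv.1 hv.2 s.2.2.2.1 s.2.2.2.2

-- number of legs one full pass of size h consumes (h, then pairs h-1,h-1, h-2,h-2, …): 2h-1
def legsN : Nat → Nat
  | 0 => 0
  | 1 => 1
  | 2 => 3
  | h+3 => 4 + legsN (h+1)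

def solution (n : Int) (jump : Int) : List Int :=
  let board := List.replicate n.toNat (List.replicate n.toNat (-1 : Int))
  let board := wr2 board 0 0 1
  aLoop n jump (n * n) (legsN n.toNat * ((jump * n * n).toNat + 2)) board 3 1 jump n n 0 (-1)

-- ===== PORT B =====

-- one straight leg of `ln` steps in direction (dx,dy): the emitted cells and the final position
def pathLeg (dx dy : Int) : Nat → Int → Int → List (Int × Int) × Int × Int
  | 0, cx, cy => ([], cx, cy)
  | k+1, cx, cy =>
    let cx' := cx + dx
    let cy' := cy + dy
    let r := pathLeg dx dy k cx' cy'
    ((cx', cy') :: r.1, r.2.1, r.2.2)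

-- B's _spiral: the outer ring of a size-h pass (legs h, h-1, h-1, h-2), then the inner rings
def spiralL (h cx cy : Int) : List (Int × Int) :=
  if h ≤ 0 then []
  else
    let r1 := pathLeg 0 1 h.toNat cx cy
    let r2 := pathLeg 1 0 (h - 1).toNat r1.2.1 r1.2.2
    let r3 := pathLeg 0 (-1) (h - 1).toNat r2.2.1 r2.2.2
    let r4 := pathLeg (-1) 0 (h - 2).toNat r3.2.1 r3.2.2
    (r1.1 ++ r2.1 ++ r3.1 ++ r4.1) ++ spiralL (h - 2) r4.2.1 r4.2.2
  termination_by h.toNat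
  decreasing_by omega

-- B's `for cx, cy in path` marking body (early return = .inl)
def bPass (jump endN : Int) :
    List (Int × Int) → List (List Int) → Int → Int →
    (List Int) ⊕ (List (List Int) × Int × Int)
  | [], board, cur, remain => .inr (board, cur, remain)
  | c :: rest, board, cur, remain =>
    let remain' := if rd2 board c.1 c.2 == -1 then remain - 1 else remain
    let p := if remain' == 0 then (wr2 board c.1 c.2 (cur + 1), cur + 1, jump)
             else (board, cur, remain')
    if p.2.1 == endN then .inl [c.1 + 1, c.2 + 1]
    else bPass jump endN rest p.1 p.2.1 p.2.2

-- B's `while True`: one bPass per fuel unit (same pass budget as A's fuel provides)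
def bLoop (jump endN : Int) (path : List (Int × Int)) :
    Nat → List (List Int) → Int → Int → List Int
  | 0, _, _, _ => []
  | f+1, board, cur, remain =>
    match bPass jump endN path board cur remain with
    | .inl ans => ans
    | .inr s => bLoop jump endN path f s.1 s.2.1 s.2.2

def solution_alt (n : Int) (jump : Int) : List Int :=
  let path := spiralL n 0 (-1)
  let board := List.replicate n.toNat (List.replicate n.toNat (-1 : Int))
  let board := wr2 board 0 0 1
  bLoop jump (n * n) path ((jump * n * n).toNat + 2) board 1 jump

-- ===== PRECONDITION & SPEC =====

-- Pre_ excludes exactly the inputs where the Python A does not return: n ≤ 0 (IndexError on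
-- board[0][0]) and the diverging combinations (jump ≤ 0 with n ≥ 2, and jump = 0 with n = 1).
def Pre_solution (n : Int) (jump : Int) : Prop :=
  1 ≤ n ∧ (1 ≤ jump ∨ (n = 1 ∧ jump ≤ -1))

instance (n : Int) (jump : Int) : Decidable (Pre_solution n jump) := by
  unfold Pre_solution; infer_instance

def pvWitness_solution : Int × Int := (2, 1)

def Spec_solution (n : Int) (jump : Int) (out : List Int) : Prop := out = solution_alt n jump

instance (n : Int) (jump : Int) (out : List Int) : Decidable (Spec_solution n jump out) := by
  unfold Spec_solution; infer_instance

-- ===== CLAIM =====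

def Claim_equal_solution : Prop :=
  ∀ (n : Int) (jump : Int), Dom_solution n jump → Pre_solution n jump →
    Spec_solution n jump (solution n jump)

-- ===== LEMMAS AND PROOFS =====

-- one inner marking loop of A over a leg = bPass over that leg's cells (plus the final position)
theorem aInner_eq (jump endN : Int) (k : Nat) :
    ∀ (board : List (List Int)) (cur remain cx cy dx dy : Int),
    aInner jump endN k board cur remain cx cy dx dy =
      match bPass jump endN (pathLeg dx dy k cx cy).1 board cur remain with
      | .inl a => .inl a
      | .inr s => .inr (s.1, s.2.1, s.2.2,
          (pathLeg dx dy k cx cy).2.1, (pathLeg dx dy k cx cy).2.2) := by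
  induction k with
  | zero => intros; simp [aInner, pathLeg, bPass]
  | succ k ih =>
    intro board cur remain cx cy dx dy
    simp only [aInner, pathLeg, bPass]
    split_ifs <;> first | rfl | rw [ih]

theorem bPass_append (jump endN : Int) (xs ys : List (Int × Int)) :
    ∀ (board : List (List Int)) (cur remain : Int),
    bPass jump endN (xs ++ ys) board cur remain =
      match bPass jump endN xs board cur remain with
      | .inl a => .inl a
      | .inr s => bPass jump endN ys s.1 s.2.1 s.2.2 := by
  induction xs with
  | nil => intros; simp [bPass]
  | cons c rest ih =>
    intro board cur remain
    simp only [List.cons_append, bPass]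
    split_ifs <;> first | rfl | rw [ih]

theorem legR (n jump endN : Int) (f : Nat) (board : List (List Int))
    (cur remain hor ver cx cy : Int) :
    aLoop n jump endN (f+1) board 3 cur remain hor ver cx cy =
      match bPass jump endN (pathLeg 0 1 hor.toNat cx cy).1 board cur remain with
      | .inl a => a
      | .inr s =>
        if hor == 0 || ver - 1 == 0 then
          aLoop n jump endN f s.1 3 s.2.1 s.2.2 n n 0 (-1)
        else
          aLoop n jump endN f s.1 0 s.2.1 s.2.2 hor (ver - 1)
            (pathLeg 0 1 hor.toNat cx cy).2.1 (pathLeg 0 1 hor.toNat cx cy).2.2 := by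
  conv_lhs => rw [aLoop]
  rw [show PySem.Int.mod (3+1) 4 = 0 from by decide]
  rw [aInner_eq]
  simp only [show dsGet 0 = ((0:Int), (1:Int)) from by decide]
  norm_num
  cases hb : bPass jump endN (pathLeg 0 1 hor.toNat cx cy).1 board cur remain with
  | inl a => simp
  | inr s => obtain ⟨b', c', r'⟩ := s; simp

theorem legD (n jump endN : Int) (f : Nat) (board : List (List Int))
    (cur remain hor ver cx cy : Int) :
    aLoop n jump endN (f+1) board 0 cur remain hor ver cx cy =
      match bPass jump endN (pathLeg 1 0 ver.toNat cx cy).1 board cur remain with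
      | .inl a => a
      | .inr s =>
        if hor - 1 == 0 || ver == 0 then
          aLoop n jump endN f s.1 3 s.2.1 s.2.2 n n 0 (-1)
        else
          aLoop n jump endN f s.1 1 s.2.1 s.2.2 (hor - 1) ver
            (pathLeg 1 0 ver.toNat cx cy).2.1 (pathLeg 1 0 ver.toNat cx cy).2.2 := by
  conv_lhs => rw [aLoop]
  rw [show PySem.Int.mod (0+1) 4 = 1 from by decide]
  rw [aInner_eq]
  simp only [show dsGet 1 = ((1:Int), (0:Int)) from by decide]
  norm_num
  cases hb : bPass jump endN (pathLeg 1 0 ver.toNat cx cy).1 board cur remain with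
  | inl a => simp
  | inr s => obtain ⟨b', c', r'⟩ := s; simp

theorem legL (n jump endN : Int) (f : Nat) (board : List (List Int))
    (cur remain hor ver cx cy : Int) :
    aLoop n jump endN (f+1) board 1 cur remain hor ver cx cy =
      match bPass jump endN (pathLeg 0 (-1) hor.toNat cx cy).1 board cur remain with
      | .inl a => a
      | .inr s =>
        if hor == 0 || ver - 1 == 0 then
          aLoop n jump endN f s.1 3 s.2.1 s.2.2 n n 0 (-1)
        else
          aLoop n jump endN f s.1 2 s.2.1 s.2.2 hor (ver - 1)
            (pathLeg 0 (-1) hor.toNat cx cy).2.1 (pathLeg 0 (-1) hor.toNat cx cy).2.2 := by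
  conv_lhs => rw [aLoop]
  rw [show PySem.Int.mod (1+1) 4 = 2 from by decide]
  rw [aInner_eq]
  simp only [show dsGet 2 = ((0:Int), (-1:Int)) from by decide]
  norm_num
  cases hb : bPass jump endN (pathLeg 0 (-1) hor.toNat cx cy).1 board cur remain with
  | inl a => simp
  | inr s => obtain ⟨b', c', r'⟩ := s; simp

theorem legU (n jump endN : Int) (f : Nat) (board : List (List Int))
    (cur remain hor ver cx cy : Int) :
    aLoop n jump endN (f+1) board 2 cur remain hor ver cx cy =
      match bPass jump endN (pathLeg (-1) 0 ver.toNat cx cy).1 board cur remain with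
      | .inl a => a
      | .inr s =>
        if hor - 1 == 0 || ver == 0 then
          aLoop n jump endN f s.1 3 s.2.1 s.2.2 n n 0 (-1)
        else
          aLoop n jump endN f s.1 3 s.2.1 s.2.2 (hor - 1) ver
            (pathLeg (-1) 0 ver.toNat cx cy).2.1 (pathLeg (-1) 0 ver.toNat cx cy).2.2 := by
  conv_lhs => rw [aLoop]
  rw [show PySem.Int.mod (2+1) 4 = 3 from by decide]
  rw [aInner_eq]
  simp only [show dsGet 3 = ((-1:Int), (0:Int)) from by decide]
  norm_num
  cases hb : bPass jump endN (pathLeg (-1) 0 ver.toNat cx cy).1 board cur remain with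
  | inl a => simp
  | inr s => obtain ⟨b', c', r'⟩ := s; simp

-- one full pass of A's machine (legsN h legs) = bPass over spiralL h, then back at the reset state
theorem passEq (n jump endN : Int) :
    ∀ (hN : Nat), 1 ≤ hN → ∀ (rest : Nat) (board : List (List Int)) (cur remain cx cy : Int),
    aLoop n jump endN (legsN hN + rest) board 3 cur remain (hN:Int) (hN:Int) cx cy =
      match bPass jump endN (spiralL (hN:Int) cx cy) board cur remain with
      | .inl a => a
      | .inr s => aLoop n jump endN rest s.1 3 s.2.1 s.2.2 n n 0 (-1) := by
  intro hN
  induction hN using Nat.strong_induction_on with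
  | _ hN ih =>
  intro h1 rest board cur remain cx cy
  rcases hN with _ | _ | _ | k
  · omega
  -- h = 1 : one leg (R of length 1), then reset
  · have hf : legsN 1 + rest = rest + 1 := by simp [legsN]; omega
    rw [hf, legR]
    have hs : spiralL ((1:Nat):Int) cx cy = (pathLeg 0 1 (((1:Nat):Int)).toNat cx cy).1 := by
      rw [spiralL]
      norm_num
      rw [spiralL]
      norm_num [pathLeg, show ((-1:Int)).toNat = 0 from rfl]
    rw [hs]
    cases hb : bPass jump endN (pathLeg 0 1 (((1:Nat):Int)).toNat cx cy).1 board cur remain with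
    | inl a => simp
    | inr s => norm_num
  -- h = 2 : three legs (R2, D1, L1), then reset
  · have hf : legsN (0+1+1) + rest = rest + 1 + 1 + 1 := by simp only [legsN]; omega
    rw [hf]
    have hcast : (((0:Nat)+1+1 : Nat) : Int) = 2 := by norm_num
    rw [hcast]
    have sz : ∀ x y : Int, spiralL 0 x y = [] := by
      intro x y; rw [spiralL]; norm_num
    conv_rhs => rw [spiralL]
    simp only [show ¬((2:Int) ≤ 0) from by norm_num, if_false,
      show ((2:Int)).toNat = 2 from rfl, show ((2:Int)-1).toNat = 1 from rfl,
      show ((2:Int)-2).toNat = 0 from rfl, show ((2:Int)-2) = 0 from by norm_num,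
      Int.toNat_zero, sz, pathLeg, List.append_nil, List.nil_append, List.append_assoc]
    rw [legR, bPass_append]
    simp only [show ((2:Int)).toNat = 2 from rfl, show ((1:Int)).toNat = 1 from rfl,
      show ((2:Int)-1) = 1 from by norm_num, show ((1:Int)-1) = 0 from by norm_num,
      show (((2:Int) == 0) || ((1:Int) == 0)) = false from by decide,
      show (((1:Int) == 0) || ((1:Int) == 0)) = false from by decide,
      show (((1:Int) == 0) || ((0:Int) == 0)) = true from by decide,
      Bool.false_eq_true, if_false, if_true, pathLeg]
    split
    · rfl
    · rw [legD, bPass_append]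
      simp only [show ((2:Int)).toNat = 2 from rfl, show ((1:Int)).toNat = 1 from rfl,
        show ((2:Int)-1) = 1 from by norm_num, show ((1:Int)-1) = 0 from by norm_num,
        show (((2:Int) == 0) || ((1:Int) == 0)) = false from by decide,
        show (((1:Int) == 0) || ((1:Int) == 0)) = false from by decide,
        show (((1:Int) == 0) || ((0:Int) == 0)) = true from by decide,
        Bool.false_eq_true, if_false, if_true, pathLeg]
      split
      · rfl
      · rw [legL]
        simp only [show ((2:Int)).toNat = 2 from rfl, show ((1:Int)).toNat = 1 from rfl,
          show ((2:Int)-1) = 1 from by norm_num, show ((1:Int)-1) = 0 from by norm_num,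
          show (((2:Int) == 0) || ((1:Int) == 0)) = false from by decide,
          show (((1:Int) == 0) || ((1:Int) == 0)) = false from by decide,
          show (((1:Int) == 0) || ((0:Int) == 0)) = true from by decide,
          Bool.false_eq_true, if_false, if_true, pathLeg]
  -- h = k+3 : four legs (R, D, L, U of the outer ring), then the size-(k+1) pass via ih
  · have hN3 : k+1+1+1 = k+3 := by omega
    rw [hN3]
    have hcast : (((k+3 : Nat)) : Int) = (k:Int)+3 := by push_cast; ring
    rw [hcast]
    have hf : legsN (k+3) + rest = legsN (k+1) + rest + 1 + 1 + 1 + 1 := by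
      simp only [legsN]; omega
    rw [hf]
    have t1 : ((k:Int)+3).toNat = k+3 := by omega
    have t2 : ((k:Int)+2).toNat = k+2 := by omega
    have t3 : ((k:Int)+1).toNat = k+1 := by omega
    have e1 : (k:Int)+3-1 = (k:Int)+2 := by ring
    have e2 : (k:Int)+2-1 = (k:Int)+1 := by ring
    have e3 : (k:Int)+3-2 = (k:Int)+1 := by ring
    conv_rhs => rw [spiralL]
    simp only [show ¬((k:Int)+3 ≤ 0) from by omega, if_false, e1, e2, e3, t1, t2, t3,
      List.append_assoc]
    rw [legR, bPass_append]
    simp only [e1, e2, e3, t1, t2, t3,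
      show (((k:Int)+3 == 0) || ((k:Int)+2 == 0)) = false from by
        simp only [Bool.or_eq_false_iff, beq_eq_false_iff_ne, ne_eq]; omega,
      Bool.false_eq_true, if_false]
    split
    · rfl
    · rw [legD, bPass_append]
      simp only [e1, e2, e3, t1, t2, t3,
        show (((k:Int)+2 == 0) || ((k:Int)+2 == 0)) = false from by
          simp only [Bool.or_eq_false_iff, beq_eq_false_iff_ne, ne_eq]; omega,
        Bool.false_eq_true, if_false]
      split
      · rfl
      · rw [legL, bPass_append]
        simp only [e1, e2, e3, t1, t2, t3,
          show (((k:Int)+2 == 0) || ((k:Int)+1 == 0)) = false from by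
            simp only [Bool.or_eq_false_iff, beq_eq_false_iff_ne, ne_eq]; omega,
          Bool.false_eq_true, if_false]
        split
        · rfl
        · rw [legU, bPass_append]
          simp only [e1, e2, e3, t1, t2, t3,
            show (((k:Int)+1 == 0) || ((k:Int)+1 == 0)) = false from by
              simp only [Bool.or_eq_false_iff, beq_eq_false_iff_ne, ne_eq]; omega,
            Bool.false_eq_true, if_false]
          have hck : (((k+1 : Nat)) : Int) = (k:Int)+1 := by push_cast; ring
          have iheq := ih (k+1) (by omega) (by omega) rest
          rw [hck] at iheq
          split
          · rfl
          · rw [iheq]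

theorem mainEq (n jump endN : Int) (hN : Nat) (h1 : 1 ≤ hN) (hn : (hN:Int) = n) :
    ∀ (f : Nat) (board : List (List Int)) (cur remain : Int),
    aLoop n jump endN (legsN hN * f) board 3 cur remain n n 0 (-1) =
      bLoop jump endN (spiralL n 0 (-1)) f board cur remain := by
  subst hn
  intro f
  induction f with
  | zero => intros; simp [aLoop, bLoop]
  | succ f ih =>
    intro board cur remain
    have hf : legsN hN * (f+1) = legsN hN + legsN hN * f := by ring
    rw [hf, passEq ((hN:Nat):Int) jump endN hN h1]
    rw [bLoop]
    cases hb : bPass jump endN (spiralL ((hN:Nat):Int) 0 (-1)) board cur remain with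
    | inl a => simp
    | inr s => exact ih s.1 s.2.1 s.2.2

-- ===== VERDICT =====

theorem solution_spec : Claim_equal_solution := by
  unfold Claim_equal_solution
  intro n jump _ hpre
  unfold Spec_solution solution solution_alt
  obtain ⟨hn, -⟩ := hpre
  have h1 : 1 ≤ n.toNat := by omega
  have hc : ((n.toNat : Nat) : Int) = n := by omega
  exact mainEq n jump (n*n) n.toNat h1 hc ((jump*n*n).toNat + 2) _ 1 jump
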